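-- pv_equiv track=rewrite | github.com/tuzianna/pythoncode | computing principle/2048.py | adjust_grid
-- ===== SOURCE A (Python) =====
-- UP = 1
--
-- LEFT = 3
--
-- RIGHT = 4
--
-- def adjust_grid(grid,direction):
--     """
--         to reverse the grid we get after move
--         """
--     height = len(grid)
--     width = len(grid[0])
--     if direction == RIGHT or direction == LEFT:
--         new_grid = [[0 for dummy_i in range(width)] for dummy_j in range(height)]
--         for row in range(height):
--             for col in range(width):
--                 if direction == LEFT:
--                     new_grid[row][col] = grid[row][col]
--                 else:
--                     new_grid[row][col] = grid[row][width - 1 - col]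
--     else:
--         new_grid = [[0 for dummy_i in range(height)] for dummy_j in range(width)]
--         for row in range(width):
--             for col in range(height):
--                 if direction == UP:
--                     new_grid[row][col] = grid[col][row]
--                 else:
--                     new_grid[row][col] = grid[col][width - 1 - row]
--     return new_grid
-- ===== SOURCE B (Python) =====
-- UP = 1
--
-- LEFT = 3
--
-- RIGHT = 4
--
-- def adjust_grid(grid, direction):
--     """rebuild the moved grid by tagging every cell with its flat destination
--     index, sorting the tagged cells, and chunking the sorted values into rows"""
--     height = len(grid)
--     width = len(grid[0])
--     if direction == RIGHT or direction == LEFT: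
--         out_h, out_w = height, width
--     else:
--         out_h, out_w = width, height
--     cells = []
--     for r in range(height):
--         for c in range(width):
--             if direction == LEFT:
--                 key = r * out_w + c
--             elif direction == RIGHT:
--                 key = r * out_w + (width - 1 - c)
--             elif direction == UP:
--                 key = c * out_w + r
--             else:
--                 key = (width - 1 - c) * out_w + r
--             cells.append((key, grid[r][c]))
--     cells.sort(key=lambda cell: cell[0])
--     vals = [v for _, v in cells]
--     return [vals[i * out_w:(i + 1) * out_w] for i in range(out_h)]
-- ===== Notes on version B (the rewrite author's own statement) =====
-- stated objective: alternative
-- what changed: A scatters values cell by cell into a pre-allocated zero grid with direction-dependent index assignments; B never builds or mutates an output grid: it tags each source cell with a flat destination index, sorts the tagged cells by that key, and slices the sorted value stream into output rows.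
import Mathlib
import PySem

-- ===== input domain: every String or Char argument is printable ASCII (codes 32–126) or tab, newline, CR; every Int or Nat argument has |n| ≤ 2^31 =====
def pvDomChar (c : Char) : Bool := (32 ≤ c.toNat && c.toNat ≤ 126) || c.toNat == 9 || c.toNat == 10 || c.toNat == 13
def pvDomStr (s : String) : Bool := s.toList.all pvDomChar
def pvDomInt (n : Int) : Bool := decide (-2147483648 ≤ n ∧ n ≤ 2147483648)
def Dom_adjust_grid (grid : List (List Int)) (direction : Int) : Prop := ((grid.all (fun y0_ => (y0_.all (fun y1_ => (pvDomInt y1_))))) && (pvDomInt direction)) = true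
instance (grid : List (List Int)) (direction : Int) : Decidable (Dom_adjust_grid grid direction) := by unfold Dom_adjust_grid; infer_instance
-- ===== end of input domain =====

-- B replaces A's cell-by-cell scatter into a pre-allocated mutable grid by a
-- sort-based gather: tag each cell with its flat destination index, sort by the key,
-- slice the sorted values into rows; objective: alternative algorithm (not faster).

-- ===== PORT A =====
-- Literal port of A. Python's list indexing here is always with indices produced by
-- range(...), hence non-negative; under Pre_ they are in range, so getD with a default
-- matches Python exactly (Python raises outside Pre_). The per-cell assignment
-- new_grid[row][col] = v becomes List.set at the (in-range, non-negative) index.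
def adjust_grid (grid : List (List Int)) (direction : Int) : List (List Int) :=
  let height := grid.length
  let width := (grid.getD 0 []).length
  if direction == 4 || direction == 3 then
    let new_grid := (List.range height).map (fun _ => (List.range width).map (fun _ => (0:Int)))
    (List.range height).foldl (fun g row =>
      (List.range width).foldl (fun g col =>
        g.set row ((g.getD row []).set col
          (if direction == 3 then (grid.getD row []).getD col 0
           else (grid.getD row []).getD (width - 1 - col) 0))) g) new_grid
  else
    let new_grid := (List.range width).map (fun _ => (List.range height).map (fun _ => (0:Int)))
    (List.range width).foldl (fun g row =>
      (List.range height).foldl (fun g col =>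
        g.set row ((g.getD row []).set col
          (if direction == 1 then (grid.getD col []).getD row 0
           else (grid.getD col []).getD (width - 1 - row) 0))) g) new_grid

-- ===== PORT B =====
-- Literal port of Source B: cells.append((key, grid[r][c])) is the foldl accumulating
-- acc ++ [...]; cells.sort(key=...) is PySem.List.sorted with that key; the final
-- slices vals[i*out_w:(i+1)*out_w] are PySem.List.slice with the cast Nat bounds.
def adjust_grid_alt (grid : List (List Int)) (direction : Int) : List (List Int) :=
  let height := grid.length
  let width := (grid.getD 0 []).length
  let out_h := if direction == 4 || direction == 3 then height else width
  let out_w := if direction == 4 || direction == 3 then width else height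
  let cells : List (Nat × Int) := (List.range height).foldl (fun acc r =>
      (List.range width).foldl (fun acc c =>
        acc ++ [((if direction == 3 then r * out_w + c
                  else if direction == 4 then r * out_w + (width - 1 - c)
                  else if direction == 1 then c * out_w + r
                  else (width - 1 - c) * out_w + r),
                 (grid.getD r []).getD c 0)]) acc) []
  let sortedCells := PySem.List.sorted cells (fun cell => cell.1)
  let vals := sortedCells.map (fun cell => cell.2)
  (List.range out_h).map (fun i =>
    PySem.List.slice vals (some ((i * out_w : Nat) : Int)) (some (((i + 1) * out_w : Nat) : Int)))

-- ===== PRECONDITION & SPEC =====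
-- Pre_ is exactly where the Python A returns normally: the grid is non-empty (else
-- len(grid[0]) raises IndexError) and no row is shorter than the first (else the per-cell
-- indexing raises IndexError).
def Pre_adjust_grid (grid : List (List Int)) (direction : Int) : Prop :=
  grid ≠ [] ∧ ∀ row ∈ grid, (grid.headD []).length ≤ row.length
instance (grid : List (List Int)) (direction : Int) : Decidable (Pre_adjust_grid grid direction) := by
  unfold Pre_adjust_grid; infer_instance

def pvWitness_adjust_grid : List (List Int) × Int := ([[1, 2], [3, 4]], 1)

def Spec_adjust_grid (grid : List (List Int)) (direction : Int) (out : List (List Int)) : Prop := out = adjust_grid_alt grid direction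
instance (grid : List (List Int)) (direction : Int) (out : List (List Int)) : Decidable (Spec_adjust_grid grid direction out) := by unfold Spec_adjust_grid; infer_instance

-- ===== CLAIM (what is proved, stated in full; the proofs are below) =====
def Claim_equal_adjust_grid : Prop := ∀ (grid : List (List Int)) (direction : Int), Dom_adjust_grid grid direction → Pre_adjust_grid grid direction → Spec_adjust_grid grid direction (adjust_grid grid direction)

-- ===== LEMMAS AND PROOFS =====

-- ---- A-side: the double scatter loop builds the grid of f-values row by row ----

-- Filling a row cell by cell at indices 0..W-1.
theorem foldl_fill (f : Nat → Int) : ∀ (W : Nat) (row : List Int), W ≤ row.length →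
    (List.range W).foldl (fun r c => r.set c (f c)) row
      = (List.range W).map f ++ row.drop W := by
  intro W
  induction W with
  | zero => intro row _; simp
  | succ W ih =>
    intro row hW
    have hlt : W < row.length := hW
    rw [List.range_succ, List.foldl_append, ih row (Nat.le_of_lt hlt)]
    simp only [List.foldl_cons, List.foldl_nil, List.map_append, List.map_cons, List.map_nil]
    rw [List.set_append]
    have hlen : ((List.range W).map f).length = W := by simp
    rw [if_neg (by omega), hlen, Nat.sub_self]
    rw [← List.getElem_cons_drop hlt, List.set_cons_zero]
    simp

-- Setting cells of row r commutes out of the inner fold.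
theorem foldl_set_row (f : Nat → Int) : ∀ (l : List Nat) (g : List (List Int)) (r : Nat),
    r < g.length →
    l.foldl (fun g c => g.set r ((g.getD r []).set c (f c))) g
      = g.set r (l.foldl (fun row c => row.set c (f c)) (g.getD r [])) := by
  intro l
  induction l with
  | nil => intro g r hr; simp [List.set_getElem_self, List.getD_eq_getElem?_getD,
      List.getElem?_eq_getElem hr]
  | cons c l ih =>
    intro g r hr
    simp only [List.foldl_cons]
    rw [ih _ r (by simpa using hr)]
    have hget : ((g.set r ((g.getD r []).set c (f c))).getD r [])
        = (g.getD r []).set c (f c) := by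
      simp [List.getD_eq_getElem?_getD, List.getElem?_set_self', List.getElem?_eq_getElem hr]
    rw [hget, List.set_set]

-- The whole double loop builds the grid of f-values row by row.
theorem build_eq (f : Nat → Nat → Int) (W : Nat) : ∀ (H : Nat) (g0 : List (List Int)),
    H ≤ g0.length → (∀ r ∈ g0, r.length = W) →
    (List.range H).foldl (fun g row =>
        (List.range W).foldl (fun g col =>
          g.set row ((g.getD row []).set col (f row col))) g) g0
      = (List.range H).map (fun r => (List.range W).map (f r)) ++ g0.drop H := by
  intro H
  induction H with
  | zero => intro g0 _ _; simp
  | succ H ih =>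
    intro g0 hH hrect
    rw [List.range_succ, List.foldl_append, ih g0 (Nat.le_of_lt hH) hrect]
    simp only [List.foldl_cons, List.foldl_nil]
    set A := (List.range H).map (fun r => (List.range W).map (f r)) with hA
    have hAlen : A.length = H := by simp [hA]
    have hHlt : H < g0.length := hH
    have hget : (A ++ g0.drop H).getD H [] = g0[H] := by
      rw [List.getD_eq_getElem?_getD, List.getElem?_append_right (by omega), hAlen,
        Nat.sub_self]
      rw [List.getElem?_drop]
      simp [List.getElem?_eq_getElem hHlt]
    have hrow : g0[H].length = W := hrect _ (List.getElem_mem hHlt)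
    rw [foldl_set_row (f H) _ _ H (by simp [hAlen]; omega), hget,
      foldl_fill (f H) W g0[H] (by omega)]
    have hdrop : List.drop W g0[H] = [] := List.drop_eq_nil_of_le (le_of_eq hrow)
    rw [hdrop, List.append_nil, List.set_append, if_neg (by omega), hAlen, Nat.sub_self,
      List.drop_eq_getElem_cons hHlt, List.set_cons_zero]
    simp [hA]

-- ---- B-side machinery ----

-- The canonical row-major keyed cell list for an H×W output with values v.
def Lof (H W : Nat) (v : Nat → Nat → Int) : List (Nat × Int) :=
  (List.range H).flatMap (fun i => (List.range W).map (fun j => (i * W + j, v i j)))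

theorem map_range_rev {β : Type} (W : Nat) (f : Nat → β) :
    (List.range W).map (fun c => f (W - 1 - c)) = ((List.range W).map f).reverse := by
  apply List.ext_getElem
  · simp
  · intro i h1 h2
    rw [List.getElem_reverse]
    simp only [List.getElem_map, List.getElem_range, List.length_map, List.length_range]

-- Row-major flat keys: the blocks i*W+j, j<W, concatenated over i<H, are range (H*W).
theorem flatMap_range_mul {β : Type} (g : Nat → β) (W : Nat) : ∀ (H : Nat),
    (List.range H).flatMap (fun i => (List.range W).map (fun j => g (i * W + j)))
      = (List.range (H * W)).map g := by
  intro H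
  induction H with
  | zero => simp
  | succ H ih =>
    rw [List.range_succ, List.flatMap_append, ih, Nat.succ_mul, List.range_add,
      List.map_append, List.map_map]
    simp [Function.comp]

-- Moving the singletons of an interleaved flatMap to the back, up to permutation.
theorem flatMap_append_singleton_perm {α β : Type} (g : α → List β) (h : α → β) :
    ∀ (l : List α), (l.flatMap (fun c => g c ++ [h c])).Perm (l.flatMap g ++ l.map h) := by
  intro l
  induction l with
  | nil => simp
  | cons a l ih =>
    simp only [List.flatMap_cons, List.map_cons, List.append_assoc, List.cons_append]
    refine List.Perm.append_left _ ?_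
    exact (List.Perm.cons _ ih).trans List.perm_middle.symm

-- Enumerating a rectangle column-major is a permutation of enumerating it row-major.
theorem flatMap_transpose_perm {β : Type} (W : Nat) (F : Nat → Nat → β) : ∀ (H : Nat),
    ((List.range H).flatMap (fun r => (List.range W).map (fun c => F r c))).Perm
      ((List.range W).flatMap (fun c => (List.range H).map (fun r => F r c))) := by
  intro H
  induction H with
  | zero => simp
  | succ H ih =>
    rw [List.range_succ]
    simp only [List.flatMap_append, List.map_append, List.map_cons, List.map_nil,
      List.flatMap_cons, List.flatMap_nil, List.append_nil]
    refine List.Perm.trans ?_ (flatMap_append_singleton_perm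
      (fun c => (List.range H).map (fun r => F r c)) (fun c => F H c) (List.range W)).symm
    exact ih.append (List.Perm.refl _)

-- Slicing block i back out of a concatenation of equal-length blocks.
theorem drop_take_flatMap {α β : Type} (B : α → List β) (W : Nat) :
    ∀ (l : List α) (i : Nat) (h : i < l.length), (∀ a ∈ l, (B a).length = W) →
    ((l.flatMap B).drop (i * W)).take W = B l[i] := by
  intro l
  induction l with
  | nil => intro i h _; simp at h
  | cons a l ih =>
    intro i h hlen
    cases i with
    | zero =>
      simp only [Nat.zero_mul, List.drop_zero, List.flatMap_cons, List.getElem_cons_zero]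
      rw [List.take_append_of_le_length (le_of_eq (hlen a (by simp)).symm),
        List.take_of_length_le (le_of_eq (hlen a (by simp)))]
    | succ i =>
      simp only [List.flatMap_cons, List.getElem_cons_succ]
      have hBa : (B a).length = W := hlen a (by simp)
      rw [List.drop_append, List.drop_of_length_le (by rw [hBa, Nat.succ_mul]; omega),
        hBa]
      have hidx : (i + 1) * W - W = i * W := by rw [Nat.succ_mul, Nat.add_sub_cancel]
      rw [hidx]
      simp only [List.nil_append]
      exact ih i (by simpa using h) (fun x hx => hlen x (by simp [hx]))

-- Lof is strictly increasing in the key.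
theorem Lof_pairwise (H W : Nat) (v : Nat → Nat → Int) :
    (Lof H W v).Pairwise (fun a b => a.1 < b.1) := by
  have hmap : (Lof H W v).map Prod.fst = List.range (H * W) := by
    unfold Lof
    rw [List.map_flatMap]
    have : ∀ i, ((List.range W).map (fun j => (i * W + j, v i j))).map Prod.fst
        = (List.range W).map (fun j => i * W + j) := by
      intro i; rw [List.map_map]; rfl
    calc (List.range H).flatMap
            (fun i => ((List.range W).map (fun j => (i * W + j, v i j))).map Prod.fst)
        = (List.range H).flatMap (fun i => (List.range W).map (fun j => id (i * W + j))) := by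
            simp [this]
      _ = (List.range (H * W)).map id := flatMap_range_mul id W H
      _ = List.range (H * W) := by simp
  have := List.pairwise_lt_range (n := H * W)
  rw [← hmap, List.pairwise_map] at this
  exact this

-- Common tail: once the keyed cell list is a permutation of Lof, B's sort-and-slice
-- produces exactly the row-major grid of v-values.
theorem sorted_slice_eq (H W : Nat) (v : Nat → Nat → Int) (cells : List (Nat × Int))
    (hperm : (Lof H W v).Perm cells) :
    (List.range H).map (fun i =>
        PySem.List.slice ((PySem.List.sorted cells (fun cell => cell.1)).map
          (fun cell => cell.2))
          (some ((i * W : Nat) : Int)) (some (((i + 1) * W : Nat) : Int)))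
      = (List.range H).map (fun i => (List.range W).map (v i)) := by
  have hsorted : PySem.List.sorted cells (fun cell => cell.1) = Lof H W v :=
    PySem.List.sorted_eq_of_perm_of_pairwise_lt cells (Lof H W v) _ hperm
      (Lof_pairwise H W v)
  rw [hsorted]
  have hvals : (Lof H W v).map (fun cell => cell.2)
      = (List.range H).flatMap (fun i => (List.range W).map (v i)) := by
    unfold Lof
    rw [List.map_flatMap]
    simp [List.map_map, Function.comp_def]
  apply List.map_congr_left
  intro i hi
  have hiH : i < H := List.mem_range.mp hi
  have hcast : ((i + 1) * W : Nat) = (i * W : Nat) + (W : Nat) := by ring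
  rw [hvals, hcast, Nat.cast_add, PySem.List.slice_natCast_add]
  have := drop_take_flatMap (fun i => (List.range W).map (v i)) W (List.range H) i
    (by simpa using hiH) (by intro a _; simp)
  simpa using this

-- cells for RIGHT: each row's keys run backwards, a per-row reversal of Lof.
theorem perm_right (H W : Nat) (D : Nat → Nat → Int) :
    (Lof H W (fun i j => D i (W - 1 - j))).Perm
      ((List.range H).flatMap (fun r =>
        (List.range W).map (fun c => (r * W + (W - 1 - c), D r c)))) := by
  unfold Lof
  refine List.Perm.flatMap (List.Perm.refl _) ?_
  intro r _
  have hblock : (List.range W).map (fun c => (r * W + (W - 1 - c), D r c))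
      = ((List.range W).map (fun j => (r * W + j, D r (W - 1 - j)))).reverse := by
    rw [← map_range_rev]
    apply List.map_congr_left
    intro c hc
    have hcW := List.mem_range.mp hc
    have : W - 1 - (W - 1 - c) = c := by omega
    simp [this]
  rw [hblock]
  exact (List.reverse_perm _).symm

-- cells for UP: row-major enumeration of the transposed keys.
theorem perm_up (H W : Nat) (D : Nat → Nat → Int) :
    (Lof W H (fun i j => D j i)).Perm
      ((List.range H).flatMap (fun r =>
        (List.range W).map (fun c => (c * H + r, D r c)))) := by
  exact (flatMap_transpose_perm W (fun r c => (c * H + r, D r c)) H).symm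

-- cells for DOWN: transpose, then the outer block order reversed.
theorem perm_down (H W : Nat) (D : Nat → Nat → Int) :
    (Lof W H (fun i j => D j (W - 1 - i))).Perm
      ((List.range H).flatMap (fun r =>
        (List.range W).map (fun c => ((W - 1 - c) * H + r, D r c)))) := by
  refine List.Perm.trans ?_
    (flatMap_transpose_perm W (fun r c => ((W - 1 - c) * H + r, D r c)) H).symm
  have hmaprev : (List.range W).map (fun c => W - 1 - c) = (List.range W).reverse := by
    have := map_range_rev W (fun c => c)
    simpa using this
  have hX : (List.range W).flatMap (fun c =>
        (List.range H).map (fun r => ((W - 1 - c) * H + r, D r c)))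
      = ((List.range W).map (fun c => W - 1 - c)).flatMap
          (fun i => (List.range H).map (fun j => (i * H + j, D j (W - 1 - i)))) := by
    rw [List.flatMap_map]
    apply List.flatMap_congr
    intro c hc
    have hcW := List.mem_range.mp hc
    have : W - 1 - (W - 1 - c) = c := by omega
    simp [this]
  refine List.Perm.trans ?_ (List.Perm.of_eq hX.symm)
  rw [hmaprev]
  exact List.Perm.flatMap (List.reverse_perm _).symm (fun _ _ => List.Perm.refl _)

-- ===== VERDICT (by name: the statement is the Claim_ definition above) =====
theorem adjust_grid_spec : Claim_equal_adjust_grid := by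
  intro grid direction _ hpre
  unfold Spec_adjust_grid adjust_grid adjust_grid_alt
  set H := grid.length with hH
  set W := (grid.getD 0 []).length with hW
  set D : Nat → Nat → Int := fun r c => (grid.getD r []).getD c 0 with hD
  have hzlen : ∀ (n m : Nat),
      ((List.range n).map (fun _ => (List.range m).map (fun _ => (0:Int)))).length = n := by
    intro n m; simp
  have hzrect : ∀ (n m : Nat) (r : List Int),
      r ∈ (List.range n).map (fun _ => (List.range m).map (fun _ => (0:Int))) →
        r.length = m := by
    intro n m r hr
    obtain ⟨-, -, rfl⟩ := List.mem_map.mp hr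
    simp
  simp only [PySem.List.foldl_append_singleton_eq_map, PySem.List.foldl_append_eq_flatMap,
    List.nil_append]
  by_cases h3 : direction = 3
  · subst h3
    simp only [show ((3:Int) == 4) = false from rfl, show ((3:Int) == 3) = true from rfl,
      Bool.or_true, if_true]
    rw [build_eq (fun r c => D r c) W H _ (le_of_eq (hzlen H W).symm) (hzrect H W),
      List.drop_eq_nil_of_le (le_of_eq (hzlen H W)), List.append_nil]
    exact (sorted_slice_eq H W D _ (List.Perm.refl _)).symm
  · by_cases h4 : direction = 4
    · subst h4
      simp only [show ((4:Int) == 3) = false from rfl, show ((4:Int) == 4) = true from rfl,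
        Bool.true_or, Bool.false_eq_true, if_true, if_false]
      rw [build_eq (fun r c => D r (W - 1 - c)) W H _ (le_of_eq (hzlen H W).symm)
        (hzrect H W), List.drop_eq_nil_of_le (le_of_eq (hzlen H W)), List.append_nil]
      exact (sorted_slice_eq H W (fun i j => D i (W - 1 - j)) _ (perm_right H W D)).symm
    · simp only [show (direction == 3) = false from by simp [h3],
        show (direction == 4) = false from by simp [h4], Bool.false_eq_true, if_false]
      by_cases h1 : direction = 1
      · subst h1
        simp only [show ((1:Int) == 1) = true from rfl, if_true]
        rw [build_eq (fun r c => D c r) H W _ (le_of_eq (hzlen W H).symm) (hzrect W H),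
          List.drop_eq_nil_of_le (le_of_eq (hzlen W H)), List.append_nil]
        exact (sorted_slice_eq W H (fun i j => D j i) _ (perm_up H W D)).symm
      · simp only [show (direction == 1) = false from by simp [h1], Bool.false_eq_true,
          if_false]
        rw [build_eq (fun r c => D c (W - 1 - r)) H W _ (le_of_eq (hzlen W H).symm)
          (hzrect W H), List.drop_eq_nil_of_le (le_of_eq (hzlen W H)), List.append_nil]
        exact (sorted_slice_eq W H (fun i j => D j (W - 1 - i)) _ (perm_down H W D)).symm
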